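-- pv_equiv track=rewrite | github.com/981377660LMT/algorithm-study | 5_map/2964. Number of Divisible Triplet Sums.py | divisibleTripletCount
-- ===== SOURCE A (Python) =====
-- from collections import defaultdict
-- from typing import List
--
-- def divisibleTripletCount(nums: List[int], d: int) -> int:
--     counter = defaultdict(int)
--     n, res = len(nums), 0
--     for i in range(n):
--         for j in range(i + 1, n):
--             need = (-nums[i] - nums[j]) % d
--             res += counter[need]
--         counter[nums[i] % d] += 1
--     return res
-- ===== SOURCE B (Python) =====
-- def divisibleTripletCount(nums, d):
--     # Histogram of residues of PAIR sums among the elements already seen;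
--     # each new element x first collects all pairs completing a divisible triplet,
--     # then pairs itself with every previously seen element.
--     res = 0
--     pair_counter = {}
--     seen = []
--     for x in nums:
--         res += pair_counter.get((-x) % d, 0)
--         for p in seen:
--             k = (p + x) % d
--             pair_counter[k] = pair_counter.get(k, 0) + 1
--         seen.append(x)
--     return res
-- ===== Notes on version B (the rewrite author's own statement) =====
-- stated objective: alternative
-- what changed: B transposes the decomposition: instead of A's index-based double loop querying a histogram of single-element residues once per (i,j) pair, B walks the list itself keeping a histogram of pairwise-sum residues over the already-seen prefix and queries it once per new element as the largest member of a triplet.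
import Mathlib
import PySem

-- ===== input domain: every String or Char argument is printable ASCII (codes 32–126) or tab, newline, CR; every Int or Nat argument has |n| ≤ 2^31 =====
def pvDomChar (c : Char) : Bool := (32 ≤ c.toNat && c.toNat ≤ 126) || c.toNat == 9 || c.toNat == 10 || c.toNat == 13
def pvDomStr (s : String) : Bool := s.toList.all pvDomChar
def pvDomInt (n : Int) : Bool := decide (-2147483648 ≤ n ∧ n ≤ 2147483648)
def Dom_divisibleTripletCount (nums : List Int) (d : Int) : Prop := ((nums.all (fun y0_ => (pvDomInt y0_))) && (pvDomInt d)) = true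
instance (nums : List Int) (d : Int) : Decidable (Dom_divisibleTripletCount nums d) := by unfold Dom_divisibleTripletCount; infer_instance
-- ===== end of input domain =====

-- B transposes the decomposition: it walks the list itself (no index arithmetic) with a
-- histogram of pairwise-sum residues over the already-seen prefix, querying it once per new
-- element as the largest member of a triplet; same O(n^2) cost, different decomposition.

-- ===== PORT A =====
-- 'counter[need]' on a defaultdict(int) reads the value 0 for a missing key (the side effect of
-- inserting the key with value 0 never changes any later read), so it is ported as getD _ 0;
-- 'counter[k] += 1' is ported as Dict.modify k 0 (·+1).
def divisibleTripletCount (nums : List Int) (d : Int) : Int :=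
  let n : Int := PySem.List.len nums
  let st := (PySem.List.pyRange 0 n 1).foldl (fun (st : PySem.Dict Int Int × Int) i =>
    let res := (PySem.List.pyRange (i + 1) n 1).foldl (fun r j =>
      r + st.1.getD (PySem.Int.mod (-(PySem.List.pyGetD nums i 0) - PySem.List.pyGetD nums j 0) d) 0) st.2
    (st.1.modify (PySem.Int.mod (PySem.List.pyGetD nums i 0) d) 0 (· + 1), res))
    (PySem.Dict.empty, 0)
  st.2

-- ===== PORT B =====
-- 'for x in nums' over state (res, pair_counter, seen); the inner 'for p in seen' is a fold over
-- the seen list; 'pc[k] = pc.get(k, 0) + 1' is ported as Dict.insert k (getD k 0 + 1).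
def divisibleTripletCount_alt (nums : List Int) (d : Int) : Int :=
  (nums.foldl (fun (st : Int × PySem.Dict Int Int × List Int) x =>
    let res := st.1 + st.2.1.getD (PySem.Int.mod (-x) d) 0
    let pc := st.2.2.foldl (fun dd p =>
      let k := PySem.Int.mod (p + x) d
      dd.insert k (dd.getD k 0 + 1)) st.2.1
    (res, pc, st.2.2 ++ [x])) ((0 : Int), PySem.Dict.empty, ([] : List Int))).1

-- ===== PRECONDITION & SPEC =====
-- Pre_ excludes exactly the inputs where A raises ZeroDivisionError: d = 0 with a nonempty list
-- (with nums = [] no '%' is ever evaluated and A returns 0).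
def Pre_divisibleTripletCount (nums : List Int) (d : Int) : Prop := d ≠ 0 ∨ nums = []
instance (nums : List Int) (d : Int) : Decidable (Pre_divisibleTripletCount nums d) := by unfold Pre_divisibleTripletCount; infer_instance
def pvWitness_divisibleTripletCount : List Int × Int := ([3, 3, 4, 7, 8], 5)

def Spec_divisibleTripletCount (nums : List Int) (d : Int) (out : Int) : Prop := out = divisibleTripletCount_alt nums d
instance (nums : List Int) (d : Int) (out : Int) : Decidable (Spec_divisibleTripletCount nums d out) := by unfold Spec_divisibleTripletCount; infer_instance

-- ===== CLAIM (what is proved, stated in full; the proofs are below) =====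
def Claim_equal_divisibleTripletCount : Prop := ∀ (nums : List Int) (d : Int), Dom_divisibleTripletCount nums d → Pre_divisibleTripletCount nums d → Spec_divisibleTripletCount nums d (divisibleTripletCount nums d)

-- ===== LEMMAS AND PROOFS =====

-- A's result, written as the sum it accumulates: for each i (element x) and later j (element z),
-- the number of earlier w with d | w + x + z.
def sumA (d : Int) : List Int → List Int → Int
  | _, [] => 0
  | seen, x :: rest =>
      (rest.map (fun z => ((seen.countP (fun w => decide (d ∣ w + x + z)) : Nat) : Int))).sum
        + sumA d (seen ++ [x]) rest

-- Number of ordered pairs (earlier, later) inside `seen` whose sum plus x is divisible by d.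
def pairsD (d : Int) : List Int → Int → Int
  | [], _ => 0
  | a :: t, x => ((t.countP (fun b => decide (d ∣ a + b + x)) : Nat) : Int) + pairsD d t x

-- B's result, written as the sum it accumulates.
def sumB (d : Int) : List Int → List Int → Int
  | _, [] => 0
  | seen, x :: rest => pairsD d seen x + sumB d (seen ++ [x]) rest

-- Value of B's pair-sum histogram at key v.
def pairCnt (d : Int) : List Int → Int → Int
  | [], _ => 0
  | a :: t, v => ((t.countP (fun b => PySem.Int.mod (a + b) d == v) : Nat) : Int) + pairCnt d t v

theorem pymod_congr {d : Int} (hd : d ≠ 0) (a b : Int) :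
    (PySem.Int.mod a d = PySem.Int.mod b d) ↔ d ∣ a - b := by
  constructor
  · intro h
    have ha := PySem.Int.floordiv_mul_add_mod a d
    have hb := PySem.Int.floordiv_mul_add_mod b d
    refine ⟨PySem.Int.floordiv a d - PySem.Int.floordiv b d, ?_⟩
    linear_combination h - ha + hb
  · rintro ⟨q, hq⟩
    have ha := PySem.Int.floordiv_mul_add_mod a d
    have hb := PySem.Int.floordiv_mul_add_mod b d
    have hdvd : d ∣ (PySem.Int.mod a d - PySem.Int.mod b d) := by
      refine ⟨q - (PySem.Int.floordiv a d - PySem.Int.floordiv b d), ?_⟩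
      linear_combination hq + ha - hb
    rcases lt_or_gt_of_ne hd with hneg | hpos
    · have h1 := PySem.Int.mod_neg_bounds a hneg
      have h2 := PySem.Int.mod_neg_bounds b hneg
      have hdvd' : (-d) ∣ (PySem.Int.mod a d - PySem.Int.mod b d) := (Int.neg_dvd).mpr hdvd
      have := Int.eq_zero_of_abs_lt_dvd hdvd' (by rw [abs_lt]; omega)
      omega
    · have h1n := PySem.Int.mod_nonneg a hpos
      have h1l := PySem.Int.mod_lt a hpos
      have h2n := PySem.Int.mod_nonneg b hpos
      have h2l := PySem.Int.mod_lt b hpos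
      have := Int.eq_zero_of_abs_lt_dvd hdvd (by rw [abs_lt]; omega)
      omega

theorem count_map_eq_countP {α β : Type} [DecidableEq β] (f : α → β) (l : List α) (v : β) :
    (l.map f).count v = l.countP (fun w => f w == v) := by
  simp [List.count, List.countP_map]; rfl

theorem countP_pm_eq {d : Int} (hd : d ≠ 0) (seen : List Int) (x z : Int) :
    seen.countP (fun w => PySem.Int.mod w d == PySem.Int.mod (-x - z) d)
      = seen.countP (fun w => decide (d ∣ w + x + z)) := by
  apply List.countP_congr
  intro w _
  simp only [beq_iff_eq, decide_eq_true_eq, pymod_congr hd]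
  constructor <;> intro h <;>
    · have : w - (-x - z) = w + x + z := by ring
      first | rwa [this] at h | rwa [this]

theorem countP_pm_pair {d : Int} (hd : d ≠ 0) (a x : Int) (t : List Int) :
    t.countP (fun b => PySem.Int.mod (a + b) d == PySem.Int.mod (-x) d)
      = t.countP (fun b => decide (d ∣ a + b + x)) := by
  apply List.countP_congr
  intro b _
  simp only [beq_iff_eq, decide_eq_true_eq, pymod_congr hd]
  constructor <;> intro h <;>
    · have : a + b - -x = a + b + x := by ring
      first | rwa [this] at h | rwa [this]

theorem pairCnt_eval {d : Int} (hd : d ≠ 0) (seen : List Int) (x : Int) :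
    pairCnt d seen (PySem.Int.mod (-x) d) = pairsD d seen x := by
  induction seen with
  | nil => rfl
  | cons a t ih => rw [pairCnt, pairsD, ih, countP_pm_pair hd]

theorem pairCnt_append (d : Int) (x v : Int) (seen : List Int) :
    pairCnt d (seen ++ [x]) v
      = pairCnt d seen v + (((seen.map (fun w => PySem.Int.mod (w + x) d)).count v : Nat) : Int) := by
  induction seen with
  | nil => simp [pairCnt]
  | cons a t ih =>
      rw [List.cons_append, pairCnt, ih, pairCnt]
      rw [List.countP_append, List.countP_singleton, List.map_cons, List.count_cons]
      by_cases h : PySem.Int.mod (a + x) d = v <;> simp [h] <;> omega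

theorem pairsD_append (d : Int) (x y : Int) (s : List Int) :
    pairsD d (s ++ [x]) y
      = pairsD d s y + ((s.countP (fun w => decide (d ∣ w + x + y)) : Nat) : Int) := by
  induction s with
  | nil => simp [pairsD]
  | cons a t ih =>
      rw [List.cons_append, pairsD, ih, pairsD]
      rw [List.countP_append, List.countP_singleton, List.countP_cons]
      by_cases h : d ∣ a + x + y <;> simp [h] <;> omega

-- B counts, in addition to everything A counts from the frame (seen, rest), the triples whose
-- two smaller indices both lie in `seen`; with seen = [] the two coincide.
theorem sumBA (d : Int) :
    ∀ (rest seen : List Int),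
      sumB d seen rest = sumA d seen rest + (rest.map (fun y => pairsD d seen y)).sum := by
  intro rest
  induction rest with
  | nil => intro seen; simp [sumA, sumB]
  | cons x rest ih =>
      intro seen
      rw [sumB, sumA, ih (seen ++ [x])]
      simp only [pairsD_append, List.map_cons, List.sum_cons]
      rw [PySem.List.sum_map_add_int]
      ring

theorem pyGetD_append_elem (seen rest : List Int) (x : Int) :
    PySem.List.pyGetD (seen ++ x :: rest) (seen.length : Int) 0 = x := by
  rw [PySem.List.pyGetD_eq_getElem _ _ (by positivity) (by simp)]
  simp

-- A's outer loop, started after an already-processed prefix `seen` whose residue histogram is c.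
theorem loopA (d : Int) (hd : d ≠ 0) (nums : List Int) :
    ∀ (rest seen : List Int) (r : Int) (c : PySem.Dict Int Int),
      nums = seen ++ rest →
      (∀ v, c.getD v 0 = ((seen.map (fun w => PySem.Int.mod w d)).count v : Int)) →
      ((PySem.List.pyRange (seen.length : Int) (PySem.List.len nums) 1).foldl
        (fun (st : PySem.Dict Int Int × Int) i =>
          let res := (PySem.List.pyRange (i + 1) (PySem.List.len nums) 1).foldl (fun r j =>
            r + st.1.getD (PySem.Int.mod (-(PySem.List.pyGetD nums i 0) - PySem.List.pyGetD nums j 0) d) 0) st.2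
          (st.1.modify (PySem.Int.mod (PySem.List.pyGetD nums i 0) d) 0 (· + 1), res))
        (c, r)).2 = r + sumA d seen rest := by
  intro rest
  induction rest with
  | nil =>
      intro seen r c hn hc
      have : PySem.List.pyRange (seen.length : Int) (PySem.List.len nums) 1 = [] := by
        apply PySem.List.pyRange_one_eq_nil
        simp [PySem.List.len, hn]
      rw [this]; simp [sumA]
  | cons x rest ih =>
      intro seen r c hn hc
      subst hn
      have hlt : (seen.length : Int) < PySem.List.len (seen ++ x :: rest) := by
        simp [PySem.List.len_eq]
      rw [PySem.List.pyRange_one_cons hlt, List.foldl_cons]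
      have hget : PySem.List.pyGetD (seen ++ x :: rest) ((seen.length : Int)) 0 = x :=
        pyGetD_append_elem seen rest x
      simp only [hget]
      rw [PySem.List.foldl_pyRange_pyGetD (seen ++ x :: rest) 0
            (fun acc z => acc + c.getD (PySem.Int.mod (-x - z) d) 0) r (by positivity)]
      have hdrop : (((seen.length : Int)) + 1).toNat = seen.length + 1 := by omega
      have hdrop2 : (seen ++ x :: rest).drop (seen.length + 1) = rest := by
        simp
      rw [hdrop, hdrop2, PySem.List.foldl_add]
      have hterm : ∀ z : Int, c.getD (PySem.Int.mod (-x - z) d) 0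
          = ((seen.countP (fun w => decide (d ∣ w + x + z)) : Nat) : Int) := by
        intro z
        rw [hc, count_map_eq_countP, countP_pm_eq hd]
      simp only [hterm]
      have hc' : ∀ v, ((c.modify (PySem.Int.mod x d) 0 (· + 1)).getD v 0)
          = ((((seen ++ [x]).map (fun w => PySem.Int.mod w d)).count v : Nat) : Int) := by
        intro v
        have h1 := PySem.Dict.getD_foldl_modify_add_one [PySem.Int.mod x d] c v
        simp only [List.foldl_cons, List.foldl_nil] at h1
        rw [h1, hc, List.map_append, List.count_append]
        push_cast
        simp
      have hlen2 : (((seen ++ [x]).length : Nat) : Int) = (seen.length : Int) + 1 := by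
        simp
      have := ih (seen ++ [x])
        (r + (rest.map (fun z => ((seen.countP (fun w => decide (d ∣ w + x + z)) : Nat) : Int))).sum)
        (c.modify (PySem.Int.mod x d) 0 (· + 1)) (by simp) hc'
      rw [hlen2] at this
      rw [this]
      show _ = r + sumA d seen (x :: rest)
      rw [sumA]
      ring

-- B's loop over the remaining elements, started from an arbitrary consistent state.
theorem loopB (d : Int) (hd : d ≠ 0) :
    ∀ (rest seen : List Int) (r : Int) (c : PySem.Dict Int Int),
      (∀ v, c.getD v 0 = pairCnt d seen v) →
      ((rest.foldl (fun (st : Int × PySem.Dict Int Int × List Int) x =>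
        let res := st.1 + st.2.1.getD (PySem.Int.mod (-x) d) 0
        let pc := st.2.2.foldl (fun dd p =>
          let k := PySem.Int.mod (p + x) d
          dd.insert k (dd.getD k 0 + 1)) st.2.1
        (res, pc, st.2.2 ++ [x])) (r, c, seen)).1) = r + sumB d seen rest := by
  intro rest
  induction rest with
  | nil => intro seen r c _; simp [sumB]
  | cons x rest ih =>
      intro seen r c hc
      rw [List.foldl_cons]
      simp only
      have e : (seen.foldl (fun (dd : PySem.Dict Int Int) (p : Int) =>
            dd.insert (PySem.Int.mod (p + x) d) (dd.getD (PySem.Int.mod (p + x) d) 0 + 1)) c)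
          = ((seen.map (fun w => PySem.Int.mod (w + x) d)).foldl
              (fun (dd : PySem.Dict Int Int) v => dd.insert v (dd.getD v 0 + 1)) c) :=
        (List.foldl_map (f := fun w => PySem.Int.mod (w + x) d)
          (g := fun (dd : PySem.Dict Int Int) v => dd.insert v (dd.getD v 0 + 1))
          (l := seen) (init := c)).symm
      rw [e]
      have hc' : ∀ v, (((seen.map (fun w => PySem.Int.mod (w + x) d)).foldl
            (fun (dd : PySem.Dict Int Int) v => dd.insert v (dd.getD v 0 + 1)) c).getD v 0)
          = pairCnt d (seen ++ [x]) v := by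
        intro v
        rw [PySem.Dict.getD_foldl_insert_add_one, hc, pairCnt_append]
      rw [ih (seen ++ [x]) _ _ hc']
      rw [hc (PySem.Int.mod (-x) d), pairCnt_eval hd, sumB]
      ring

theorem portA_eq (nums : List Int) (d : Int) (hd : d ≠ 0) :
    divisibleTripletCount nums d = sumA d [] nums := by
  unfold divisibleTripletCount
  have := loopA d hd nums nums [] 0 PySem.Dict.empty rfl
    (by intro v; simp [PySem.Dict.getD_empty])
  simpa using this

theorem portB_eq (nums : List Int) (d : Int) (hd : d ≠ 0) :
    divisibleTripletCount_alt nums d = sumB d [] nums := by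
  unfold divisibleTripletCount_alt
  have := loopB d hd nums [] 0 PySem.Dict.empty
    (by intro v; simp [PySem.Dict.getD_empty, pairCnt])
  simpa using this

-- ===== VERDICT (by name: the statement is the Claim_ definition above) =====
theorem divisibleTripletCount_spec : Claim_equal_divisibleTripletCount := by
  intro nums d _ hpre
  unfold Spec_divisibleTripletCount
  rcases hpre with hd | hnil
  · rw [portA_eq nums d hd, portB_eq nums d hd, sumBA d nums []]
    have : ∀ y : Int, pairsD d ([] : List Int) y = 0 := fun _ => rfl
    simp [this]
  · subst hnil
    rfl
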